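-- pv_equiv track=rewrite | github.com/baskervilski/advent-of-code | 11/code.py | get_neighbor_indices
-- ===== SOURCE A (Python) =====
-- def valid_point(point, nrows, ncols):
--     i, j = point
--     return (0 <= i < nrows) & (0 <= j < ncols)
--
-- def get_neighbor_indices(point, array_shape, neighbor_limit):
--
--     i, j = point
--     nrows, ncols = array_shape
--
--     neighbors = dict(
--         north = [(i - x, j) for x in range(1, neighbor_limit + 1) if valid_point((i - x, j), nrows, ncols)],
--         south = [(i + x, j) for x in range(1, neighbor_limit + 1) if valid_point((i + x, j), nrows, ncols)],
--         east = [(i, j + x) for x in range(1, neighbor_limit + 1) if valid_point((i, j + x), nrows, ncols)],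
--         west = [(i, j - x) for x in range(1, neighbor_limit + 1) if valid_point((i, j - x), nrows, ncols)],
--
--         northwest = [(i - x, j - x) for x in range(1, neighbor_limit + 1) if valid_point((i - x, j - x), nrows, ncols)],
--         southwest = [(i + x, j - x) for x in range(1, neighbor_limit + 1) if valid_point((i + x, j - x), nrows, ncols)],
--         northeast = [(i - x, j + x) for x in range(1, neighbor_limit + 1) if valid_point((i - x, j + x), nrows, ncols)],
--         southeast = [(i + x, j + x) for x in range(1, neighbor_limit + 1) if valid_point((i + x, j + x), nrows, ncols)]
--     )
--
--     return neighbors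
-- ===== SOURCE B (Python) =====
-- def get_neighbor_indices(point, array_shape, neighbor_limit):
--     # closed-form: for each direction compute the valid step interval [lo, hi]
--     # intersected with [1, neighbor_limit], instead of filtering every step.
--     i, j = point
--     nrows, ncols = array_shape
--
--     up = (i - nrows + 1, i)          # 0 <= i - x < nrows
--     down = (-i, nrows - 1 - i)       # 0 <= i + x < nrows
--     left = (j - ncols + 1, j)        # 0 <= j - x < ncols
--     right = (-j, ncols - 1 - j)      # 0 <= j + x < ncols
--
--     def steps(a, b):
--         return range(max(1, a), min(neighbor_limit, b) + 1)
--
--     def both(p, q):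
--         return (max(p[0], q[0]), min(p[1], q[1]))
--
--     row_ok = 0 <= i < nrows
--     col_ok = 0 <= j < ncols
--
--     return dict(
--         north=[(i - x, j) for x in steps(*up)] if col_ok else [],
--         south=[(i + x, j) for x in steps(*down)] if col_ok else [],
--         east=[(i, j + x) for x in steps(*right)] if row_ok else [],
--         west=[(i, j - x) for x in steps(*left)] if row_ok else [],
--         northwest=[(i - x, j - x) for x in steps(*both(up, left))],
--         southwest=[(i + x, j - x) for x in steps(*both(down, left))],
--         northeast=[(i - x, j + x) for x in steps(*both(up, right))],
--         southeast=[(i + x, j + x) for x in steps(*both(down, right))],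
--     )
-- ===== Notes on version B (the rewrite author's own statement) =====
-- stated objective: faster
-- what changed: Each direction's valid step interval is computed in closed form from the boundary inequalities (clamped to [1, neighbor_limit]) and mapped directly, instead of filtering every step in range(1, neighbor_limit+1) with a validity predicate.
import Mathlib
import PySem

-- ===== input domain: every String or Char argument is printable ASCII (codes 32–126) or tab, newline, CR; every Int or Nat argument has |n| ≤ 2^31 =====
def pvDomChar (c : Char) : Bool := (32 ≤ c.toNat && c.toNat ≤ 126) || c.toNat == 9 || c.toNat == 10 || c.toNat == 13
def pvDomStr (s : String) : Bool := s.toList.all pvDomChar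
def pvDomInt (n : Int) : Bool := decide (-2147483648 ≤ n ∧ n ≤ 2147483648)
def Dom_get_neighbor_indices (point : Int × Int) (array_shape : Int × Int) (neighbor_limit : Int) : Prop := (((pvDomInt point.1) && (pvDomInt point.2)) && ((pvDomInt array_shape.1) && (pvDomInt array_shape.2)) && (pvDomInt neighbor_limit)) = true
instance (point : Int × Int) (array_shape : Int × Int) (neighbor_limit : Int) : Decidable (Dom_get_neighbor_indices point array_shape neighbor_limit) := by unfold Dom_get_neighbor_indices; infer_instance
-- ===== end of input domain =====

-- B replaces A's per-step validity filter over range(1, limit+1) by a closed-form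
-- valid step interval per direction (alternative decomposition; same return value).

-- ===== PORT A =====
def valid_point (point : Int × Int) (nrows : Int) (ncols : Int) : Bool :=
  (decide (0 ≤ point.1 ∧ point.1 < nrows)) && (decide (0 ≤ point.2 ∧ point.2 < ncols))

def get_neighbor_indices (point : Int × Int) (array_shape : Int × Int) (neighbor_limit : Int) : List (String × List (Int × Int)) :=
  let i := point.1; let j := point.2
  let nrows := array_shape.1; let ncols := array_shape.2
  let r := PySem.List.pyRange 1 (neighbor_limit + 1) 1
  [ ("north", ((r.filter (fun x => valid_point (i - x, j) nrows ncols)).map (fun x => (i - x, j)))),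
    ("south", ((r.filter (fun x => valid_point (i + x, j) nrows ncols)).map (fun x => (i + x, j)))),
    ("east",  ((r.filter (fun x => valid_point (i, j + x) nrows ncols)).map (fun x => (i, j + x)))),
    ("west",  ((r.filter (fun x => valid_point (i, j - x) nrows ncols)).map (fun x => (i, j - x)))),
    ("northwest", ((r.filter (fun x => valid_point (i - x, j - x) nrows ncols)).map (fun x => (i - x, j - x)))),
    ("southwest", ((r.filter (fun x => valid_point (i + x, j - x) nrows ncols)).map (fun x => (i + x, j - x)))),
    ("northeast", ((r.filter (fun x => valid_point (i - x, j + x) nrows ncols)).map (fun x => (i - x, j + x)))),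
    ("southeast", ((r.filter (fun x => valid_point (i + x, j + x) nrows ncols)).map (fun x => (i + x, j + x)))) ]

-- ===== PORT B =====
-- steps(a, b) = range(max(1, a), min(neighbor_limit, b) + 1)
def pvSteps (L a b : Int) : List Int := PySem.List.pyRange (max 1 a) (min L b + 1) 1

def get_neighbor_indices_alt (point : Int × Int) (array_shape : Int × Int) (neighbor_limit : Int) : List (String × List (Int × Int)) :=
  let i := point.1; let j := point.2
  let nrows := array_shape.1; let ncols := array_shape.2
  let up : Int × Int := (i - nrows + 1, i)
  let down : Int × Int := (-i, nrows - 1 - i)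
  let left : Int × Int := (j - ncols + 1, j)
  let right : Int × Int := (-j, ncols - 1 - j)
  let both := fun (p q : Int × Int) => (max p.1 q.1, min p.2 q.2)
  let row_ok := decide (0 ≤ i ∧ i < nrows)
  let col_ok := decide (0 ≤ j ∧ j < ncols)
  [ ("north", if col_ok then (pvSteps neighbor_limit up.1 up.2).map (fun x => (i - x, j)) else []),
    ("south", if col_ok then (pvSteps neighbor_limit down.1 down.2).map (fun x => (i + x, j)) else []),
    ("east",  if row_ok then (pvSteps neighbor_limit right.1 right.2).map (fun x => (i, j + x)) else []),
    ("west",  if row_ok then (pvSteps neighbor_limit left.1 left.2).map (fun x => (i, j - x)) else []),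
    ("northwest", (pvSteps neighbor_limit (both up left).1 (both up left).2).map (fun x => (i - x, j - x))),
    ("southwest", (pvSteps neighbor_limit (both down left).1 (both down left).2).map (fun x => (i + x, j - x))),
    ("northeast", (pvSteps neighbor_limit (both up right).1 (both up right).2).map (fun x => (i - x, j + x))),
    ("southeast", (pvSteps neighbor_limit (both down right).1 (both down right).2).map (fun x => (i + x, j + x))) ]

-- ===== PRECONDITION & SPEC =====
def Spec_get_neighbor_indices (point : Int × Int) (array_shape : Int × Int) (neighbor_limit : Int) (out : List (String × List (Int × Int))) : Prop := out = get_neighbor_indices_alt point array_shape neighbor_limit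
instance (point : Int × Int) (array_shape : Int × Int) (neighbor_limit : Int) (out : List (String × List (Int × Int))) : Decidable (Spec_get_neighbor_indices point array_shape neighbor_limit out) := by unfold Spec_get_neighbor_indices; infer_instance

-- ===== CLAIM (what is proved, stated in full; the proofs are below) =====
def Claim_equal_get_neighbor_indices : Prop := ∀ (point : Int × Int) (array_shape : Int × Int) (neighbor_limit : Int), Dom_get_neighbor_indices point array_shape neighbor_limit → Spec_get_neighbor_indices point array_shape neighbor_limit (get_neighbor_indices point array_shape neighbor_limit)

-- ===== LEMMAS AND PROOFS =====

-- filtering an interval condition out of a contiguous range is the clamped range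
theorem filter_pyRange_interval (a b lo hi : Int) :
    (PySem.List.pyRange lo hi 1).filter (fun x => decide (a ≤ x ∧ x ≤ b))
      = PySem.List.pyRange (max lo a) (min hi (b + 1)) 1 := by
  by_cases h : lo < hi
  · have hn : (hi - lo).toNat ≠ 0 := by omega
    generalize hN : (hi - lo).toNat = N at *
    induction N generalizing lo with
    | zero => omega
    | succ n ih =>
      rw [PySem.List.pyRange_one_cons h, List.filter_cons]
      by_cases hp : a ≤ lo ∧ lo ≤ b
      · simp only [hp]
        have hmax : max lo a = lo := by omega
        have hlt : lo < min hi (b + 1) := by omega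
        rw [hmax, PySem.List.pyRange_one_cons hlt]
        by_cases h2 : lo + 1 < hi
        · rw [ih (lo+1) h2 (by omega) (by omega)]
          have hm : max (lo+1) a = lo + 1 := by omega
          rw [hm]; simp
        · rw [PySem.List.pyRange_one_eq_nil (by omega), List.filter_nil,
              PySem.List.pyRange_one_eq_nil (by omega)]; simp
      · simp only [hp, decide_false, if_neg, Bool.false_eq_true, not_false_iff]
        by_cases h2 : lo + 1 < hi
        · rw [ih (lo+1) h2 (by omega) (by omega)]
          rcases not_and_or.mp hp with ha | hb
          · congr 1; omega
          · rw [PySem.List.pyRange_one_eq_nil (by omega),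
                PySem.List.pyRange_one_eq_nil (by omega)]
        · rw [PySem.List.pyRange_one_eq_nil (by omega), List.filter_nil,
              PySem.List.pyRange_one_eq_nil (by omega)]
  · rw [PySem.List.pyRange_one_eq_nil (by omega), List.filter_nil,
        PySem.List.pyRange_one_eq_nil (by omega)]

-- a direction whose validity condition is the interval [a, b] in the step x
theorem dir_eq (L a b : Int) (p : Int → Bool)
    (hp : ∀ x, p x = decide (a ≤ x ∧ x ≤ b)) :
    (PySem.List.pyRange 1 (L + 1) 1).filter p
      = PySem.List.pyRange (max 1 a) (min L b + 1) 1 := by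
  rw [List.filter_congr (fun x _ => hp x), filter_pyRange_interval]
  congr 1; omega

-- a direction whose fixed coordinate is off-grid collects nothing
theorem dir_nil (L : Int) (p : Int → Bool) (hp : ∀ x, p x = false) :
    (PySem.List.pyRange 1 (L + 1) 1).filter p = [] :=
  List.filter_eq_nil_iff.mpr (fun x _ => by simp [hp x])

theorem get_neighbor_indices_spec : Claim_equal_get_neighbor_indices := by
  intro point shape L _
  obtain ⟨i, j⟩ := point
  obtain ⟨nrows, ncols⟩ := shape
  unfold Spec_get_neighbor_indices
  simp only [get_neighbor_indices, get_neighbor_indices_alt, pvSteps]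
  have hnw := dir_eq L (max (i - nrows + 1) (j - ncols + 1)) (min i j)
    (fun x => valid_point (i - x, j - x) nrows ncols)
    (fun x => by simp only [valid_point, ← Bool.decide_and]; rw [decide_eq_decide]; omega)
  have hsw := dir_eq L (max (-i) (j - ncols + 1)) (min (nrows - 1 - i) j)
    (fun x => valid_point (i + x, j - x) nrows ncols)
    (fun x => by simp only [valid_point, ← Bool.decide_and]; rw [decide_eq_decide]; omega)
  have hne := dir_eq L (max (i - nrows + 1) (-j)) (min i (ncols - 1 - j))
    (fun x => valid_point (i - x, j + x) nrows ncols)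
    (fun x => by simp only [valid_point, ← Bool.decide_and]; rw [decide_eq_decide]; omega)
  have hse := dir_eq L (max (-i) (-j)) (min (nrows - 1 - i) (ncols - 1 - j))
    (fun x => valid_point (i + x, j + x) nrows ncols)
    (fun x => by simp only [valid_point, ← Bool.decide_and]; rw [decide_eq_decide]; omega)
  rw [hnw, hsw, hne, hse]
  by_cases hc : 0 ≤ j ∧ j < ncols
  · rw [dir_eq L (i - nrows + 1) i _
        (fun x => by simp only [valid_point, ← Bool.decide_and]; rw [decide_eq_decide]
                     obtain ⟨h1, h2⟩ := hc; omega),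
        dir_eq L (-i) (nrows - 1 - i) (fun x => valid_point (i + x, j) nrows ncols)
        (fun x => by simp only [valid_point, ← Bool.decide_and]; rw [decide_eq_decide]
                     obtain ⟨h1, h2⟩ := hc; omega)]
    by_cases hr : 0 ≤ i ∧ i < nrows
    · rw [dir_eq L (-j) (ncols - 1 - j) (fun x => valid_point (i, j + x) nrows ncols)
          (fun x => by simp only [valid_point, ← Bool.decide_and]; rw [decide_eq_decide]
                       obtain ⟨h1, h2⟩ := hr; omega),
          dir_eq L (j - ncols + 1) j (fun x => valid_point (i, j - x) nrows ncols)
          (fun x => by simp only [valid_point, ← Bool.decide_and]; rw [decide_eq_decide]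
                       obtain ⟨h1, h2⟩ := hr; omega)]
      simp [hc, hr]
    · rw [dir_nil L (fun x => valid_point (i, j + x) nrows ncols)
          (fun x => by simp [valid_point, hr]),
          dir_nil L (fun x => valid_point (i, j - x) nrows ncols)
          (fun x => by simp [valid_point, hr])]
      simp [hc, hr]
  · rw [dir_nil L (fun x => valid_point (i - x, j) nrows ncols)
        (fun x => by simp [valid_point, hc]),
        dir_nil L (fun x => valid_point (i + x, j) nrows ncols)
        (fun x => by simp [valid_point, hc])]
    by_cases hr : 0 ≤ i ∧ i < nrows
    · rw [dir_eq L (-j) (ncols - 1 - j) (fun x => valid_point (i, j + x) nrows ncols)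
          (fun x => by simp only [valid_point, ← Bool.decide_and]; rw [decide_eq_decide]
                       obtain ⟨h1, h2⟩ := hr; omega),
          dir_eq L (j - ncols + 1) j (fun x => valid_point (i, j - x) nrows ncols)
          (fun x => by simp only [valid_point, ← Bool.decide_and]; rw [decide_eq_decide]
                       obtain ⟨h1, h2⟩ := hr; omega)]
      simp [hc, hr]
    · rw [dir_nil L (fun x => valid_point (i, j + x) nrows ncols)
          (fun x => by simp [valid_point, hr]),
          dir_nil L (fun x => valid_point (i, j - x) nrows ncols)
          (fun x => by simp [valid_point, hr])]
      simp [hc, hr]
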